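-- pv_equiv track=rewrite | github.com/Sefaria/Sefaria-Data | research/knowledge_graph/named_entity_recognition/talmud_people_classifier.py | remove_subsets
-- ===== SOURCE A (Python) =====
-- def remove_subsets(chars_to_wrap):
--     index_set_list = [set(range(start, end)) for start, end, _ in chars_to_wrap]
--     new_chars_to_wrap = []
--     for i, (temp_char_to_wrap, index_set) in enumerate(zip(chars_to_wrap, index_set_list)):
--         is_subset = False
--         for j, other_index_set in enumerate(index_set_list):
--             if i == j: continue
--             if index_set.issubset(other_index_set):
--                 is_subset = True
--                 break
--         if not is_subset:
--             new_chars_to_wrap += [temp_char_to_wrap]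
--     return new_chars_to_wrap
-- ===== SOURCE B (Python) =====
-- def remove_subsets(chars_to_wrap):
--     # An interval survives iff no *other* entry's index set contains it.
--     # len <= 1: nothing else exists, keep everything (even empty intervals).
--     if len(chars_to_wrap) <= 1:
--         return list(chars_to_wrap)
--     # Only non-empty intervals can survive; count multiplicities of (start, end).
--     pairs = [(s, e) for s, e, _ in chars_to_wrap if s < e]
--     counts = {}
--     for p in pairs:
--         counts[p] = counts.get(p, 0) + 1
--     # Sort distinct pairs by start asc, end desc: a pair is contained in some
--     # other pair iff some earlier pair in this order has end >= its end.
--     kept = set()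
--     max_end = None
--     for s, e in sorted(counts, key=lambda p: (p[0], -p[1])):
--         if counts[(s, e)] == 1 and (max_end is None or max_end < e):
--             kept.add((s, e))
--         if max_end is None or e > max_end:
--             max_end = e
--     return [c for c in chars_to_wrap if (c[0], c[1]) in kept]
-- ===== Notes on version B (the rewrite author's own statement) =====
-- stated objective: faster
-- what changed: Replaces the all-pairs set-subset scan (materialising set(range(s,e)) for every interval) with a counting dict plus one sweep over the distinct non-empty (start,end) pairs sorted by start asc / end desc, where a running maximum end detects containment in O(1) per pair.
import Mathlib
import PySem

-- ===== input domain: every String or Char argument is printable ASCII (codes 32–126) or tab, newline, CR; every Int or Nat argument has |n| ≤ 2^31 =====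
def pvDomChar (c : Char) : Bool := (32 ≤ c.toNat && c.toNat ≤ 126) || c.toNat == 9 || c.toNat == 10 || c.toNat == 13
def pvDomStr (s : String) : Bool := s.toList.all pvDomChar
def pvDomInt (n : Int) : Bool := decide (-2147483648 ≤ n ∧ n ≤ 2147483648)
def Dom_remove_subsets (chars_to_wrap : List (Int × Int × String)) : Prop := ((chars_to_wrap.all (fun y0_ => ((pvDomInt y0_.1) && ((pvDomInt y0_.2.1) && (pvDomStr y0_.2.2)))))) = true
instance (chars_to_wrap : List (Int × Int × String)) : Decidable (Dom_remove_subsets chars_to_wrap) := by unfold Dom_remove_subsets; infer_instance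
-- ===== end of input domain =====

-- B replaces A's all-pairs set(range)-subset scan by a count dict plus one sweep over the
-- distinct non-empty (start, end) pairs sorted by start asc / end desc with a running max end.

-- ===== PORT A =====
def remove_subsets (chars_to_wrap : List (Int × Int × String)) : List (Int × Int × String) :=
  let index_set_list : List (PySem.Set Int) :=
    chars_to_wrap.map (fun c => PySem.Set.ofList (PySem.List.pyRange c.1 c.2.1 1))
  (PySem.List.enumerate (chars_to_wrap.zip index_set_list) 0).foldl
    (fun acc p =>
      -- inner 'for j ... break' computing is_subset: any j ≠ i with issubset
      let is_subset : Bool :=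
        (PySem.List.enumerate index_set_list 0).any
          (fun q => !(p.1 == q.1) && PySem.Set.issubset p.2.2 q.2)
      if !is_subset then acc ++ [p.2.1] else acc) []

-- ===== PORT B =====
-- 'max_end is None or max_end < e'
def pvCondKeep (m : Option Int) (e : Int) : Bool :=
  match m with | none => true | some v => decide (v < e)
-- 'if max_end is None or e > max_end: max_end = e'
def pvBumpMax (m : Option Int) (e : Int) : Option Int :=
  match m with | none => some e | some v => if v < e then some e else some v

def remove_subsets_alt (chars_to_wrap : List (Int × Int × String)) : List (Int × Int × String) :=
  if chars_to_wrap.length ≤ 1 then chars_to_wrap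
  else
    let pairs : List (Int × Int) :=
      (chars_to_wrap.filter (fun c => decide (c.1 < c.2.1))).map (fun c => (c.1, c.2.1))
    let counts : PySem.Dict (Int × Int) Int :=
      pairs.foldl (fun d p => d.insert p (d.getD p 0 + 1)) PySem.Dict.empty
    let st : PySem.Set (Int × Int) × Option Int :=
      (PySem.List.sorted2 counts.keys (fun p => p.1) (fun p => -p.2)).foldl
        (fun st p =>
          ( if counts.getD p 0 == 1 && pvCondKeep st.2 p.2
              then PySem.Set.add st.1 p else st.1,
            pvBumpMax st.2 p.2 ))
        (PySem.Set.empty, none)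
    chars_to_wrap.filter (fun c => PySem.Set.contains st.1 (c.1, c.2.1))

-- ===== PRECONDITION & SPEC =====
def Spec_remove_subsets (chars_to_wrap : List (Int × Int × String)) (out : List (Int × Int × String)) : Prop := out = remove_subsets_alt chars_to_wrap
instance (chars_to_wrap : List (Int × Int × String)) (out : List (Int × Int × String)) : Decidable (Spec_remove_subsets chars_to_wrap out) := by unfold Spec_remove_subsets; infer_instance

-- ===== CLAIM (what is proved, stated in full; the proofs are below) =====
def Claim_equal_remove_subsets : Prop := ∀ (chars_to_wrap : List (Int × Int × String)), Dom_remove_subsets chars_to_wrap → Spec_remove_subsets chars_to_wrap (remove_subsets chars_to_wrap)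

-- ===== LEMMAS AND PROOFS =====

-- An element c of l is removed by A iff remB l c (proved below):
-- empty interval and some other index exists, or non-empty and either its (start,end)
-- pair occurs at least twice among the non-empty items, or some item with a different
-- pair contains it.
def remB (l : List (Int × Int × String)) (c : Int × Int × String) : Bool :=
  if c.2.1 ≤ c.1 then decide (2 ≤ l.length)
  else
    decide (2 ≤ l.countP (fun d => (d.1, d.2.1) == (c.1, c.2.1)))
      || l.any (fun d => !((d.1, d.2.1) == (c.1, c.2.1)) && decide (d.1 ≤ c.1) && decide (c.2.1 ≤ d.2.1))

-- set(range(s,e)) ⊆ set(range(s',e')) is interval containment (or emptiness of the left side)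
theorem issubset_range_iff (s e s' e' : Int) :
    PySem.Set.issubset (PySem.Set.ofList (PySem.List.pyRange s e 1)) (PySem.Set.ofList (PySem.List.pyRange s' e' 1)) = true
      ↔ (e ≤ s ∨ (s' ≤ s ∧ e ≤ e')) := by
  rw [PySem.Set.issubset_iff]
  constructor
  · intro h
    by_cases hse : e ≤ s
    · exact Or.inl hse
    · refine Or.inr ?_
      have h1 := h s (by simp [PySem.Set.mem_ofList, PySem.List.mem_pyRange_one]; omega)
      have h2 := h (e - 1) (by simp [PySem.Set.mem_ofList, PySem.List.mem_pyRange_one]; omega)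
      simp [PySem.Set.mem_ofList, PySem.List.mem_pyRange_one] at h1 h2
      omega
  · intro h x hx
    simp only [PySem.Set.mem_ofList, PySem.List.mem_pyRange_one] at hx ⊢
    omega

theorem countP_congr_mem {α : Type} (l : List α) (p q : α → Bool) (h : ∀ x ∈ l, p x = q x) :
    l.countP p = l.countP q := by
  induction l with
  | nil => rfl
  | cons a t ih => simp [List.countP_cons, h a (by simp), ih (fun x hx => h x (by simp [hx]))]

-- two distinct indices satisfying p give countP ≥ 2
theorem two_le_countP_of_two_indices {α : Type} (l : List α) (p : α → Bool) (i k : Nat)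
    (hik : i ≠ k) (hi : i < l.length) (hk : k < l.length)
    (hpi : p l[i] = true) (hpk : p l[k] = true) : 2 ≤ l.countP p := by
  induction l generalizing i k with
  | nil => simp at hi
  | cons a t ih =>
    match i, k with
    | 0, 0 => omega
    | 0, k + 1 =>
      have hk' : k < t.length := by simpa using hk
      have : 1 ≤ t.countP p := by
        simp only [List.getElem_cons_succ] at hpk
        have := List.countP_pos_iff.mpr ⟨t[k], List.getElem_mem hk', hpk⟩
        omega
      simp only [List.getElem_cons_zero] at hpi
      rw [List.countP_cons_of_pos (pa := hpi)]; omega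
    | i + 1, 0 =>
      have hi' : i < t.length := by simpa using hi
      have : 1 ≤ t.countP p := by
        simp only [List.getElem_cons_succ] at hpi
        have := List.countP_pos_iff.mpr ⟨t[i], List.getElem_mem hi', hpi⟩
        omega
      simp only [List.getElem_cons_zero] at hpk
      rw [List.countP_cons_of_pos (pa := hpk)]; omega
    | i + 1, k + 1 =>
      have := ih i k (by omega) (by simpa using hi) (by simpa using hk)
        (by simpa using hpi) (by simpa using hpk)
      rw [List.countP_cons]; omega

-- countP ≥ 2 gives, for any index i, another index satisfying p
theorem exists_other_index_of_two_le_countP {α : Type} (l : List α) (p : α → Bool) (i : Nat)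
    (h : 2 ≤ l.countP p) : ∃ k, ∃ (hk : k < l.length), k ≠ i ∧ p l[k] = true := by
  induction l generalizing i with
  | nil => simp at h
  | cons a t ih =>
    by_cases hpa : p a = true
    · match i with
      | 0 =>
        have ht : 0 < t.countP p := by rw [List.countP_cons] at h; rw [if_pos hpa] at h; omega
        obtain ⟨x, hx, hpx⟩ := List.countP_pos_iff.mp ht
        obtain ⟨k, hk, hxe⟩ := List.mem_iff_getElem.mp hx
        exact ⟨k + 1, by simp; omega, by omega, by simpa [hxe]⟩
      | i + 1 => exact ⟨0, by simp, by omega, by simpa⟩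
    · have ht : 2 ≤ t.countP p := by rw [List.countP_cons] at h; rw [if_neg hpa] at h; omega
      match i with
      | 0 =>
        obtain ⟨k, hk, _, hpk⟩ := ih 0 ht
        exact ⟨k + 1, by simp; omega, by omega, by simpa using hpk⟩
      | i + 1 =>
        obtain ⟨k, hk, hki, hpk⟩ := ih i ht
        exact ⟨k + 1, by simp; omega, by omega, by simpa using hpk⟩

-- A's per-index removal test equals remB
theorem exists_other_iff_remB (l : List (Int × Int × String)) (k : Nat) (hk : k < l.length) :
    (∃ j, ∃ (hj : j < l.length), j ≠ k ∧
        (l[k].2.1 ≤ l[k].1 ∨ (l[j].1 ≤ l[k].1 ∧ l[k].2.1 ≤ l[j].2.1)))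
      ↔ remB l l[k] = true := by
  unfold remB
  by_cases hemp : l[k].2.1 ≤ l[k].1
  · simp only [if_pos hemp, decide_eq_true_eq]
    constructor
    · rintro ⟨j, hj, hjk, -⟩; omega
    · intro hlen
      refine ⟨if k = 0 then 1 else 0, by split <;> omega, by split <;> omega, Or.inl hemp⟩
  · simp only [if_neg hemp, Bool.or_eq_true, decide_eq_true_eq, List.any_eq_true]
    constructor
    · rintro ⟨j, hj, hjk, h⟩
      rcases h with h | ⟨h1, h2⟩
      · omega
      · by_cases hpair : (l[j].1, l[j].2.1) = (l[k].1, l[k].2.1)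
        · left
          refine two_le_countP_of_two_indices l _ j k hjk hj hk ?_ ?_ <;> simp [hpair]
        · right
          exact ⟨l[j], by simp, by simp [hpair, h1, h2]⟩
    · rintro (h | ⟨d, hd, hprop⟩)
      · obtain ⟨j, hj, hjk, hpj⟩ := exists_other_index_of_two_le_countP l _ k h
        simp only [beq_iff_eq, Prod.mk.injEq] at hpj
        exact ⟨j, hj, hjk, Or.inr (by omega)⟩
      · simp only [Bool.and_eq_true, Bool.not_eq_true', beq_eq_false_iff_ne, ne_eq,
          decide_eq_true_eq, Prod.mk.injEq, not_and] at hprop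
        obtain ⟨j, hj, hdj⟩ := List.mem_iff_getElem.mp hd
        refine ⟨j, hj, ?_, Or.inr (by rw [hdj]; exact ⟨hprop.1.2, hprop.2⟩)⟩
        intro hjump
        subst hjump
        rw [hdj] at hprop
        rcases hprop with ⟨⟨hne, -⟩, -⟩
        exact hne rfl rfl
    
-- filter of an enumeration with an index-insensitive predicate is a plain filter
theorem filter_enumerate_map_snd {α : Type} (l : List α) (s : Int) (g : Int × α → Bool) (f : α → Bool)
    (h : ∀ (k : Nat) (hk : k < l.length), g (s + k, l[k]) = f l[k]) :
    ((PySem.List.enumerate l s).filter g).map (·.2) = l.filter f := by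
  induction l generalizing s with
  | nil => simp [PySem.List.enumerate]
  | cons a t ih =>
    have h0 : g (s, a) = f a := by simpa using h 0 (by simp)
    have ht := ih (s + 1) (fun k hk => by
      have := h (k + 1) (by simpa using Nat.succ_lt_succ hk)
      simpa [add_assoc, add_comm, add_left_comm] using this)
    simp only [PySem.List.enumerate_cons, List.filter_cons]
    by_cases hfa : f a = true
    · simp [h0, hfa, ht]
    · simp only [h0, hfa, Bool.false_eq_true, if_false]
      simp [ht]

-- the inner 'any' over the enumerated index sets computes remB
theorem inner_any_eq_remB (l : List (Int × Int × String)) (k : Nat) (hk : k < l.length) :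
    ((PySem.List.enumerate (l.map (fun c => PySem.Set.ofList (PySem.List.pyRange c.1 c.2.1 1))) 0).any
      (fun q => !((0 + (k : Int)) == q.1) && PySem.Set.issubset (PySem.Set.ofList (PySem.List.pyRange l[k].1 l[k].2.1 1)) q.2))
    = remB l l[k] := by
  rw [Bool.eq_iff_iff, List.any_eq_true, ← exists_other_iff_remB l k hk]
  constructor
  · rintro ⟨q, hq, hcond⟩
    rw [PySem.List.mem_enumerate_iff] at hq
    obtain ⟨j, hj, rfl⟩ := hq
    rw [List.getElem_map] at hcond
    simp only [Bool.and_eq_true, Bool.not_eq_true', beq_eq_false_iff_ne, ne_eq] at hcond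
    obtain ⟨hne, hsub⟩ := hcond
    rw [issubset_range_iff] at hsub
    have hj' : j < l.length := by simpa using hj
    refine ⟨j, hj', by intro h; exact hne (by rw [h]), ?_⟩
    rcases hsub with h | h
    · exact Or.inl (by omega)
    · exact Or.inr h
  · rintro ⟨j, hj, hjk, hcond⟩
    refine ⟨(0 + (j : Int), PySem.Set.ofList (PySem.List.pyRange l[j].1 l[j].2.1 1)), ?_, ?_⟩
    · rw [PySem.List.mem_enumerate_iff]
      exact ⟨j, by simpa using hj, by rw [List.getElem_map]⟩
    · simp only [Bool.and_eq_true, Bool.not_eq_true', beq_eq_false_iff_ne, ne_eq]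
      refine ⟨by intro h; apply hjk; omega, ?_⟩
      rw [issubset_range_iff]
      rcases hcond with h | h
      · exact Or.inl (by omega)
      · exact Or.inr h

theorem zip_self_map {α β : Type} (l : List α) (g : α → β) :
    l.zip (l.map g) = l.map (fun a => (a, g a)) := by
  induction l with
  | nil => rfl
  | cons a t ih => simp [List.zip_cons_cons, ih]

-- ===== A-side characterisation =====
theorem remove_subsets_eq_filter (l : List (Int × Int × String)) :
    remove_subsets l = l.filter (fun c => !remB l c) := by
  unfold remove_subsets
  simp only [zip_self_map]
  rw [PySem.List.foldl_append_if
    (p := fun q : Int × ((Int × Int × String) × PySem.Set Int) =>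
      !((PySem.List.enumerate (l.map (fun c => PySem.Set.ofList (PySem.List.pyRange c.1 c.2.1 1))) 0).any
        (fun r => !(q.1 == r.1) && PySem.Set.issubset q.2.2 r.2)))
    (f := fun q => q.2.1)]
  rw [List.nil_append,
    show (fun q : Int × ((Int × Int × String) × PySem.Set Int) => q.2.1)
       = ((fun x : (Int × Int × String) × PySem.Set Int => x.1) ∘ (fun q : Int × ((Int × Int × String) × PySem.Set Int) => q.2)) from rfl,
    ← List.map_map]
  rw [filter_enumerate_map_snd
    (l := l.map (fun c => (c, PySem.Set.ofList (PySem.List.pyRange c.1 c.2.1 1)))) 0 _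
    (f := fun x => !remB l x.1) ?_]
  · rw [List.filter_map, List.map_map]
    simp only [Function.comp_def, List.map_id']
  · intro k hk
    rw [List.getElem_map]
    have hk' : k < l.length := by simpa using hk
    have := inner_any_eq_remB l k hk'
    rw [this]

-- ===== B-side =====

-- the lex order used by B's sort
def ltPB (a b : Int × Int) : Bool :=
  decide (a.1 < b.1) || (!decide (b.1 < a.1) && decide (-a.2 < -b.2))

theorem ltPB_asymm {a b : Int × Int} (h : ltPB a b = true) : ltPB b a = false := by
  simp [ltPB] at *
  omega

theorem ltPB_trans {a b c : Int × Int} (h1 : ltPB a b = true) (h2 : ltPB b c = true) :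
    ltPB a c = true := by
  simp [ltPB] at *
  omega

theorem pairwise_insertBy_ltPB (x : Int × Int) (ys : List (Int × Int))
    (h : ys.Pairwise (fun a b => ltPB b a = false)) :
    (PySem.List.insertBy ltPB x ys).Pairwise (fun a b => ltPB b a = false) := by
  induction ys with
  | nil => simp [PySem.List.insertBy]
  | cons y ys ih =>
    rw [List.pairwise_cons] at h
    obtain ⟨hy, hys⟩ := h
    rw [PySem.List.insertBy]
    split
    · rename_i hxy
      rw [List.pairwise_cons]
      refine ⟨?_, List.pairwise_cons.mpr ⟨hy, hys⟩⟩
      intro z hz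
      rcases List.mem_cons.mp hz with rfl | hz
      · exact ltPB_asymm hxy
      · by_contra hzx
        rw [Bool.not_eq_false] at hzx
        have := ltPB_trans hzx hxy
        rw [hy z hz] at this
        exact Bool.false_ne_true this
    · rename_i hxy
      rw [Bool.not_eq_true] at hxy
      rw [List.pairwise_cons]
      refine ⟨?_, ih hys⟩
      intro z hz
      rcases (PySem.List.mem_insertBy _ _ _ _).mp hz with rfl | hz
      · exact hxy
      · exact hy z hz

theorem pairwise_sorted2_ltPB (xs : List (Int × Int)) :
    (PySem.List.sorted2 xs (fun p => p.1) (fun p => -p.2)).Pairwise (fun a b => ltPB b a = false) := by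
  show (xs.foldl (fun acc x => PySem.List.insertBy ltPB x acc) []).Pairwise (fun a b => ltPB b a = false)
  have aux : ∀ (ys : List (Int × Int)) (acc : List (Int × Int)),
      acc.Pairwise (fun a b => ltPB b a = false) →
      (ys.foldl (fun acc x => PySem.List.insertBy ltPB x acc) acc).Pairwise (fun a b => ltPB b a = false) := by
    intro ys
    induction ys with
    | nil => intro acc h; exact h
    | cons y t ih => intro acc h; exact ih _ (pairwise_insertBy_ltPB y acc h)
  exact aux xs [] (List.Pairwise.nil)

def lexLT (a b : Int × Int) : Prop := a.1 < b.1 ∨ (a.1 = b.1 ∧ b.2 < a.2)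

theorem pairwise_lexLT_of_sorted2 (xs : List (Int × Int)) (hnd : xs.Nodup) :
    (PySem.List.sorted2 xs (fun p => p.1) (fun p => -p.2)).Pairwise lexLT := by
  have h1 := pairwise_sorted2_ltPB xs
  have h2 : (PySem.List.sorted2 xs (fun p => p.1) (fun p => -p.2)).Nodup :=
    ((PySem.List.sorted2_perm xs _ _ _).nodup_iff).mpr hnd
  have := h1.and h2
  refine this.imp ?_
  rintro a b ⟨hlt, hne⟩
  simp [ltPB] at hlt
  have hab : ¬(a.1 = b.1 ∧ a.2 = b.2) := fun h => hne (Prod.ext h.1 h.2)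
  unfold lexLT
  omega

def optLt : Option Int → Int → Prop
  | none, _ => True
  | some v, e => v < e

-- the sweep invariant: membership in the kept set after folding the sorted pair list
theorem mem_fold_kept (cb : Int × Int → Bool) (L : List (Int × Int))
    (K : PySem.Set (Int × Int)) (m : Option Int) (p : Int × Int) (hL : L.Pairwise lexLT) :
    (p ∈ (L.foldl
        (fun (st : PySem.Set (Int × Int) × Option Int) q =>
          ( if cb q && pvCondKeep st.2 q.2
              then PySem.Set.add st.1 q else st.1,
            pvBumpMax st.2 q.2 ))
        (K, m)).1)
      ↔ p ∈ K ∨ (p ∈ L ∧ cb p = true ∧ optLt m p.2 ∧ ∀ q ∈ L, lexLT q p → q.2 < p.2) := by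
  induction L generalizing K m with
  | nil => simp
  | cons a t ih =>
    rw [List.pairwise_cons] at hL
    obtain ⟨ha, ht⟩ := hL
    rw [List.foldl_cons]
    dsimp only
    rw [ih _ _ ht]
    have hcond : (cb a && pvCondKeep m a.2) = true
        ↔ (cb a = true ∧ optLt m a.2) := by
      cases m <;> simp [optLt, pvCondKeep]
    have hm' : ∀ (e : Int), optLt (pvBumpMax m a.2) e ↔ a.2 < e ∧ optLt m e := by
      intro e
      cases m with
      | none => simp [optLt, pvBumpMax]
      | some v =>
        show optLt (if v < a.2 then some a.2 else some v) e ↔ a.2 < e ∧ optLt (some v) e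
        split_ifs with hv <;> simp only [optLt] <;> omega
    have hK' : p ∈ (if cb a && pvCondKeep m a.2
          then PySem.Set.add K a else K)
        ↔ p ∈ K ∨ ((cb a = true ∧ optLt m a.2) ∧ p = a) := by
      by_cases h : (cb a && pvCondKeep m a.2) = true
      · rw [if_pos h, PySem.Set.mem_add]
        have := hcond.mp h
        tauto
      · rw [if_neg h]
        have : ¬(cb a = true ∧ optLt m a.2) := fun hc => h (hcond.mpr hc)
        tauto
    constructor
    · rintro (hpK' | ⟨hpt, hcb, hm, hall⟩)
      · rcases hK'.mp hpK' with hpK | ⟨⟨hcba, hma⟩, rfl⟩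
        · exact Or.inl hpK
        · refine Or.inr ⟨List.mem_cons_self, hcba, hma, ?_⟩
          intro q hq hlt
          rcases List.mem_cons.mp hq with rfl | hq
          · unfold lexLT at hlt; omega
          · have := ha q hq
            unfold lexLT at hlt this; omega
      · refine Or.inr ⟨List.mem_cons_of_mem _ hpt, hcb, ((hm' p.2).mp hm).2, ?_⟩
        intro q hq hlt
        rcases List.mem_cons.mp hq with rfl | hq
        · exact ((hm' p.2).mp hm).1
        · exact hall q hq hlt
    · rintro (hpK | ⟨hp, hcb, hm, hall⟩)
      · exact Or.inl (hK'.mpr (Or.inl hpK))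
      · rcases List.mem_cons.mp hp with rfl | hpt
        · exact Or.inl (hK'.mpr (Or.inr ⟨⟨hcb, hm⟩, rfl⟩))
        · refine Or.inr ⟨hpt, hcb, (hm' p.2).mpr ⟨hall a List.mem_cons_self (ha p hpt), hm⟩,
            fun q hq hlt => hall q (List.mem_cons_of_mem _ hq) hlt⟩

-- the non-empty (start, end) pairs of the input
def pairsOf (l : List (Int × Int × String)) : List (Int × Int) :=
  (l.filter (fun c => decide (c.1 < c.2.1))).map (fun c => (c.1, c.2.1))

theorem mem_pairsOf (l : List (Int × Int × String)) (p : Int × Int) :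
    p ∈ pairsOf l ↔ ∃ c, c ∈ l ∧ c.1 < c.2.1 ∧ (c.1, c.2.1) = p := by
  simp [pairsOf, List.mem_map, List.mem_filter, and_assoc]

theorem count_pairsOf (l : List (Int × Int × String)) (c : Int × Int × String)
    (hc : c.1 < c.2.1) :
    (pairsOf l).count (c.1, c.2.1) = l.countP (fun d => (d.1, d.2.1) == (c.1, c.2.1)) := by
  unfold pairsOf
  rw [List.count_eq_countP, List.countP_map, List.countP_filter]
  apply countP_congr_mem
  intro d hd
  by_cases h : (d.1, d.2.1) = (c.1, c.2.1)
  · have : d.1 < d.2.1 := by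
      rw [Prod.mk.injEq] at h
      omega
    simp [Function.comp, h, this]
  · simp [Function.comp, h]

theorem forall_lex_iff (S : List (Int × Int)) (p : Int × Int) :
    (∀ q ∈ S, lexLT q p → q.2 < p.2) ↔ ¬∃ q, q ∈ S ∧ q ≠ p ∧ q.1 ≤ p.1 ∧ p.2 ≤ q.2 := by
  constructor
  · rintro h ⟨q, hq, hne, h1, h2⟩
    have hql : lexLT q p := by
      have : ¬(q.1 = p.1 ∧ q.2 = p.2) := fun he => hne (Prod.ext he.1 he.2)
      unfold lexLT; omega
    have := h q hq hql
    omega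
  · intro h q hq hlt
    by_contra hle
    apply h
    refine ⟨q, hq, ?_, ?_, by omega⟩
    · intro he
      rw [he] at hlt
      unfold lexLT at hlt
      omega
    · unfold lexLT at hlt
      omega

-- ===== B-side characterisation =====
theorem kept_iff_not_remB (l : List (Int × Int × String)) (h2 : 2 ≤ l.length)
    (c : Int × Int × String) (hc : c ∈ l) :
    ((c.1, c.2.1) ∈ pairsOf l ∧ (pairsOf l).count (c.1, c.2.1) = 1 ∧
        ∀ q ∈ pairsOf l, lexLT q (c.1, c.2.1) → q.2 < c.2.1)
      ↔ remB l c = false := by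
  by_cases hemp : c.2.1 ≤ c.1
  · have hnp : (c.1, c.2.1) ∉ pairsOf l := by
      rw [mem_pairsOf]
      rintro ⟨d, hd, hdlt, hde⟩
      rw [Prod.mk.injEq] at hde
      omega
    constructor
    · rintro ⟨hm, -⟩
      exact absurd hm hnp
    · intro h
      unfold remB at h
      rw [if_pos hemp] at h
      simp only [decide_eq_false_iff_not] at h
      omega
  · have hclt : c.1 < c.2.1 := by omega
    have hiff := forall_lex_iff (pairsOf l) (c.1, c.2.1)
    unfold remB
    rw [if_neg hemp, Bool.or_eq_false_iff, decide_eq_false_iff_not, List.any_eq_false]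
    constructor
    · rintro ⟨-, hcnt, hall⟩
      rw [count_pairsOf l c hclt] at hcnt
      refine ⟨by omega, ?_⟩
      intro d hd
      by_cases hcd : ((d.1, d.2.1) ≠ (c.1, c.2.1)) ∧ d.1 ≤ c.1 ∧ c.2.1 ≤ d.2.1
      · exfalso
        obtain ⟨hne', h1', h2'⟩ := hcd
        have hdlt : d.1 < d.2.1 := by omega
        exact hiff.mp hall ⟨(d.1, d.2.1), (mem_pairsOf l _).mpr ⟨d, hd, hdlt, rfl⟩, hne', h1', h2'⟩
      · by_cases he : (d.1, d.2.1) = (c.1, c.2.1)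
        · simp [he]
        · have h3 : ¬(d.1 ≤ c.1 ∧ c.2.1 ≤ d.2.1) := fun hx => hcd ⟨he, hx.1, hx.2⟩
          rcases not_and_or.mp h3 with h | h <;> simp [h]
    · rintro ⟨hcnt, hall⟩
      have h1le : 0 < l.countP (fun d => (d.1, d.2.1) == (c.1, c.2.1)) :=
        List.countP_pos_iff.mpr ⟨c, hc, by simp⟩
      have hcnt' : (pairsOf l).count (c.1, c.2.1) = 1 := by
        rw [count_pairsOf l c hclt]
        omega
      refine ⟨(mem_pairsOf l _).mpr ⟨c, hc, hclt, rfl⟩, hcnt', hiff.mpr ?_⟩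
      rintro ⟨q', hq', hne, hq1, hq2⟩
      obtain ⟨d, hd, hdlt, hde⟩ := (mem_pairsOf l q').mp hq'
      have hdf := hall d hd
      rw [← hde] at hne hq1 hq2
      simp at hdf
      have := hdf (fun ha hb => hne (by rw [Prod.mk.injEq]; exact ⟨ha, hb⟩)) hq1
      omega

theorem remove_subsets_alt_eq_filter (l : List (Int × Int × String)) :
    remove_subsets_alt l = l.filter (fun c => !remB l c) := by
  by_cases hlen : l.length ≤ 1
  · unfold remove_subsets_alt
    rw [if_pos hlen]
    have hone : ∀ d ∈ l, ∀ c ∈ l, d = c := by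
      match l, hlen with
      | [], _ => intro d hd; cases hd
      | [a], _ =>
        intro d hd c hc
        rw [List.mem_singleton] at hd hc
        rw [hd, hc]
    symm
    rw [List.filter_eq_self]
    intro c hc
    unfold remB
    split
    · simp only [Bool.not_eq_true', decide_eq_false_iff_not]
      omega
    · simp only [Bool.not_eq_true', Bool.or_eq_false_iff]
      constructor
      · simp only [decide_eq_false_iff_not]
        have := List.countP_le_length (p := fun d => (d.1, d.2.1) == (c.1, c.2.1)) (l := l)
        omega
      · rw [List.any_eq_false]
        intro d hd
        rw [hone d hd c hc]
        simp
  · have h2 : 2 ≤ l.length := by omega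
    unfold remove_subsets_alt
    rw [if_neg hlen]
    dsimp only
    rw [show (l.filter (fun c => decide (c.1 < c.2.1))).map (fun c => (c.1, c.2.1)) = pairsOf l from rfl,
      PySem.Dict.foldl_insert_getD_add_one_eq_counter, PySem.Dict.keys_counter]
    apply List.filter_congr
    intro c hc
    have hPW := pairwise_lexLT_of_sorted2 (PySem.Set.ofList (pairsOf l)) (PySem.Set.nodup_ofList _)
    have hkey := mem_fold_kept (fun q => (PySem.Dict.counter (pairsOf l)).getD q 0 == 1)
      (PySem.List.sorted2 (PySem.Set.ofList (pairsOf l)) (fun p => p.1) (fun p => -p.2))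
      PySem.Set.empty none (c.1, c.2.1) hPW
    have hms : ∀ q : Int × Int,
        q ∈ PySem.List.sorted2 (PySem.Set.ofList (pairsOf l)) (fun p => p.1) (fun p => -p.2)
          ↔ q ∈ pairsOf l :=
      fun q => (PySem.List.sorted2_perm _ _ _ _).mem_iff.trans (PySem.Set.mem_ofList _ _)
    rw [Bool.eq_iff_iff, PySem.Set.contains_iff, hkey, Bool.not_eq_true',
      ← kept_iff_not_remB l h2 c hc]
    constructor
    · rintro (h | ⟨hm, hcnt, -, hall⟩)
      · exact absurd h List.not_mem_nil
      · refine ⟨(hms _).mp hm, ?_, fun q hq => hall q ((hms q).mpr hq)⟩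
        simp only [PySem.Dict.getD_counter, beq_iff_eq] at hcnt
        exact_mod_cast hcnt
    · rintro ⟨hm, hcnt, hall⟩
      refine Or.inr ⟨(hms _).mpr hm, ?_, trivial, fun q hq => hall q ((hms q).mp hq)⟩
      simp only [PySem.Dict.getD_counter, beq_iff_eq]
      exact_mod_cast hcnt

-- ===== VERDICT (by name: the statement is the Claim_ definition above) =====
theorem remove_subsets_spec : Claim_equal_remove_subsets := by
  intro l _
  unfold Spec_remove_subsets
  rw [remove_subsets_eq_filter, remove_subsets_alt_eq_filter]
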